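-- pv_equiv track=rewrite | github.com/stressrelief/triprime | junk/somecipher.py | TRNAP
-- ===== SOURCE A (Python) =====
-- def TRNAP ( in_ls, intk_ls ) :
--     al = [ (intk_ls[i] & 15) for i in range(0,len(intk_ls)) ]
--     ah = [ ((intk_ls[i] & 240) >> 4) for i in range(0,len(intk_ls)) ]
--     trnls = al + ah
--     for i in range(0, len(trnls)) :
--         if trnls[i] == 15 :
--             in_ls.append(in_ls.pop(0))
--         else :
--             in_ls.append(in_ls.pop(trnls[i]))
--     return in_ls
-- ===== SOURCE B (Python) =====
-- def TRNAP(in_ls, intk_ls):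
--     # Bounded-window replay: every pop index is a nibble < 15, so only the first
--     # min(15, n) elements ("window") can be removed; the rest of the list and the
--     # already-moved elements are consumed lazily via indices.  O(n + m) instead of
--     # A's O(m*n) repeated list.pop.  (A mutates in_ls in place; B does not.)
--     n = len(in_ls)
--     nibs = [k & 15 for k in intk_ls] + [(k >> 4) & 15 for k in intk_ls]
--     w = 15 if n > 15 else n
--     window = in_ls[:w]
--     moved = []
--     j = w
--     h = 0
--     for t in nibs:
--         if t == 15:
--             t = 0
--         x = window.pop(t)
--         moved.append(x)
--         if j < n:
--             window.append(in_ls[j])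
--             j += 1
--         elif h < len(moved):
--             window.append(moved[h])
--             h += 1
--     return window + in_ls[j:] + moved[h:]
-- ===== Notes on version B (the rewrite author's own statement) =====
-- stated objective: faster
-- what changed: Instead of repeatedly doing list.pop(i)/append on the whole list (each pop shifting O(n) elements), B exploits that every pop index is a nibble < 15: it keeps only a 15-element window plus two read cursors into the untouched tail and the already-moved elements, so each of the m operations costs O(1) and the result is assembled once at the end; B does not mutate in_ls (A does), the claim is about the return value.
import Mathlib
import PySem

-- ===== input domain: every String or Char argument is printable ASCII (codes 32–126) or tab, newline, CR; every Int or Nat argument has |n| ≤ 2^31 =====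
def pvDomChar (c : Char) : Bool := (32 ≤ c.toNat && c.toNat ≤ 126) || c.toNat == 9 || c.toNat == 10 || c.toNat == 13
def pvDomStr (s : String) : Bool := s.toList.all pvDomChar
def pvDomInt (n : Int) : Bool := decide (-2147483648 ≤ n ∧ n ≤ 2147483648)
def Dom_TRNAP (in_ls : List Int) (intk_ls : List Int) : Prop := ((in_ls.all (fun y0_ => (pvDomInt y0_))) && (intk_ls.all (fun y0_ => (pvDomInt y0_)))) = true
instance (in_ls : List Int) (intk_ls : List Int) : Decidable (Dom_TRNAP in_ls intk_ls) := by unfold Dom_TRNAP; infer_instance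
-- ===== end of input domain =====

-- B replays the pops through a bounded 15-element window with two read cursors, O(n+m)
-- instead of A's O(m*n) repeated list.pop; A mutates in_ls in place, B does not — the
-- equivalence proved here is about the RETURN value.

-- ===== PORT A =====
-- Python `in_ls.append(in_ls.pop(t))`; PySem.List.pop? is none exactly where Python raises IndexError (excluded by Pre_).
def pvPopAppend (l : List Int) (t : Int) : List Int :=
  match PySem.List.pop? l t with
  | some (x, r) => r ++ [x]
  | none => l

-- the body of A's for-loop (branch order as in A)
def pvPermStep (l : List Int) (t : Int) : List Int :=
  if t = 15 then pvPopAppend l 0 else pvPopAppend l t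

def TRNAP (in_ls : List Int) (intk_ls : List Int) : List Int :=
  -- k & 15 = k mod 16 and (k & 240) >> 4 = (k fdiv 16) mod 16: exact for every Python int
  let al := intk_ls.map (fun k => k.emod 16)
  let ah := intk_ls.map (fun k => (k.fdiv 16).emod 16)
  let trnls := al ++ ah
  trnls.foldl pvPermStep in_ls

-- ===== PORT B =====
-- state = (window, moved, j, h): the loop body of Source B (moved' = moved ++ [x] written inline)
def pvStep (in_ls : List Int) (n : Nat) :
    List Int × List Int × Nat × Nat → Int → List Int × List Int × Nat × Nat
  | (window, moved, j, h), t =>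
    match PySem.List.pop? window (if t = 15 then (0 : Int) else t) with
    | none => (window, moved, j, h)       -- Python raises IndexError here; excluded by Pre_
    | some (x, window') =>
      if j < n then (window' ++ [in_ls.getD j 0], moved ++ [x], j + 1, h)
      else if h < (moved ++ [x]).length then
        (window' ++ [(moved ++ [x]).getD h 0], moved ++ [x], j, h + 1)
      else (window', moved ++ [x], j, h)

def TRNAP_alt (in_ls : List Int) (intk_ls : List Int) : List Int :=
  let n := in_ls.length
  -- k & 15 = k mod 16 and (k >> 4) & 15 = (k fdiv 16) mod 16: exact for every Python int
  let nibs := intk_ls.map (fun k => k.emod 16) ++ intk_ls.map (fun k => (k.fdiv 16).emod 16)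
  let w := if n > 15 then 15 else n
  let fin := nibs.foldl (pvStep in_ls n) (in_ls.take w, [], w, 0)
  fin.1 ++ in_ls.drop fin.2.2.1 ++ fin.2.1.drop fin.2.2.2

-- ===== PRECONDITION & SPEC =====
-- Pre_ excludes exactly the inputs on which A raises IndexError: some nibble of the key
-- (15 meaning index 0) is an out-of-range pop index for in_ls (whose length never changes).
def Pre_TRNAP (in_ls : List Int) (intk_ls : List Int) : Prop :=
  (intk_ls ≠ [] → in_ls ≠ []) ∧
  ∀ k ∈ intk_ls,
    (k.emod 16 = 15 ∨ k.emod 16 < in_ls.length) ∧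
    ((k.fdiv 16).emod 16 = 15 ∨ (k.fdiv 16).emod 16 < in_ls.length)

instance (in_ls : List Int) (intk_ls : List Int) : Decidable (Pre_TRNAP in_ls intk_ls) := by
  unfold Pre_TRNAP; infer_instance

def pvWitness_TRNAP : List Int × List Int := ([10, 20, 30], [33, 255])

def Spec_TRNAP (in_ls : List Int) (intk_ls : List Int) (out : List Int) : Prop := out = TRNAP_alt in_ls intk_ls
instance (in_ls : List Int) (intk_ls : List Int) (out : List Int) : Decidable (Spec_TRNAP in_ls intk_ls out) := by unfold Spec_TRNAP; infer_instance

-- ===== CLAIM (what is proved, stated in full; the proofs are below) =====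
def Claim_equal_TRNAP : Prop := ∀ (in_ls : List Int) (intk_ls : List Int), Dom_TRNAP in_ls intk_ls → Pre_TRNAP in_ls intk_ls → Spec_TRNAP in_ls intk_ls (TRNAP in_ls intk_ls)

-- ===== LEMMAS AND PROOFS =====

-- a nibble the loop may legally pop with
def pvGood (n : Nat) (t : Int) : Prop := 0 ≤ t ∧ t < 16 ∧ (t = 15 ∨ t < n)

lemma pvLoop_eq (in_ls : List Int) (hn : 1 ≤ in_ls.length) :
    ∀ (ts : List Int) (window moved : List Int) (j h : Nat),
      (∀ t ∈ ts, pvGood in_ls.length t) →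
      window.length = min 15 in_ls.length →
      j ≤ in_ls.length → h ≤ moved.length →
      j + h = min 15 in_ls.length + moved.length →
      ts.foldl pvPermStep (window ++ in_ls.drop j ++ moved.drop h) =
        (fun fin => fin.1 ++ in_ls.drop fin.2.2.1 ++ fin.2.1.drop fin.2.2.2)
          (ts.foldl (pvStep in_ls in_ls.length) (window, moved, j, h)) := by
  intro ts
  induction ts with
  | nil => intro window moved j h _ _ _ _ _; rfl
  | cons t ts ih =>
    intro window moved j h hgood hw hj hh hcount
    obtain ⟨ht0, ht16, htn⟩ := hgood t (by simp)
    -- the actual pop index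
    have hi : ∃ i : Nat, (if t = 15 then (0 : Int) else t) = (i : Int) ∧ i < window.length := by
      refine ⟨if t = 15 then 0 else t.toNat, ?_, ?_⟩
      · split <;> simp [Int.toNat_of_nonneg ht0]
      · rw [hw]; rcases htn with h15 | hlt
        · simp [h15]; omega
        · split <;> omega
    obtain ⟨i, hi_eq, hi_lt⟩ := hi
    have hiL : i < (window ++ (in_ls.drop j ++ moved.drop h)).length := by
      simp; omega
    have hx : (window ++ (in_ls.drop j ++ moved.drop h))[i] = window[i] :=
      List.getElem_append_left hi_lt
    -- one A-step
    have hA : pvPermStep (window ++ in_ls.drop j ++ moved.drop h) t =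
        (window.eraseIdx i ++ in_ls.drop j ++ moved.drop h) ++ [window[i]] := by
      unfold pvPermStep pvPopAppend
      rw [List.append_assoc]
      split
      · next h15 =>
        have : (0 : Int) = ((i : Nat) : Int) := by
          have := hi_eq; simp [h15] at this; omega
        rw [this, PySem.List.pop?_natCast _ i hiL, hx,
          List.eraseIdx_append_of_lt_length hi_lt, ← List.append_assoc]
      · next h15 =>
        have : t = ((i : Nat) : Int) := by have := hi_eq; simp [h15] at this; omega
        rw [this, PySem.List.pop?_natCast _ i hiL, hx,
          List.eraseIdx_append_of_lt_length hi_lt, ← List.append_assoc]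
    -- one B-step
    have hpop : PySem.List.pop? window (if t = 15 then (0 : Int) else t) =
        some (window[i], window.eraseIdx i) := by
      rw [hi_eq]; exact PySem.List.pop?_natCast window i hi_lt
    have hwlen : (window.eraseIdx i).length = min 15 in_ls.length - 1 := by
      rw [List.length_eraseIdx, if_pos hi_lt, hw]
    have hmin1 : 1 ≤ min 15 in_ls.length := by omega
    simp only [List.foldl_cons, hA]
    by_cases hjn : j < in_ls.length
    · -- refill from the untouched tail of in_ls
      have hB : pvStep in_ls in_ls.length (window, moved, j, h) t =
          (window.eraseIdx i ++ [in_ls.getD j 0], moved ++ [window[i]], j + 1, h) := by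
        simp only [pvStep]; rw [hpop]; simp [hjn]
      have hrepr : window.eraseIdx i ++ List.drop j in_ls ++ List.drop h moved ++ [window[i]] =
          (window.eraseIdx i ++ [in_ls.getD j 0]) ++ List.drop (j + 1) in_ls ++
            List.drop h (moved ++ [window[i]]) := by
        rw [List.getD_eq_getElem in_ls 0 hjn, List.drop_append_of_le_length hh]
        rw [List.drop_eq_getElem_cons hjn]
        simp
      rw [hB, hrepr]
      exact ih (window.eraseIdx i ++ [in_ls.getD j 0]) (moved ++ [window[i]]) (j + 1) h
        (fun t' ht' => hgood t' (by simp [ht']))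
        (by simp [hwlen]; omega) (by omega) (by simp; omega) (by simp; omega)
    · -- in_ls exhausted: refill from the moved queue
      have hjeq : j = in_ls.length := by omega
      have hhm : h < (moved ++ [window[i]]).length := by simp; omega
      have hB : pvStep in_ls in_ls.length (window, moved, j, h) t =
          (window.eraseIdx i ++ [(moved ++ [window[i]]).getD h 0],
            moved ++ [window[i]], j, h + 1) := by
        simp only [pvStep]; rw [hpop]; simp [hjn]; omega
      have hdrop : (moved ++ [window[i]]).drop h =
          (moved ++ [window[i]])[h] :: (moved ++ [window[i]]).drop (h + 1) :=
        List.drop_eq_getElem_cons hhm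
      have hrepr : window.eraseIdx i ++ List.drop j in_ls ++ List.drop h moved ++ [window[i]] =
          (window.eraseIdx i ++ [(moved ++ [window[i]]).getD h 0]) ++ List.drop j in_ls ++
            List.drop (h + 1) (moved ++ [window[i]]) := by
        rw [List.getD_eq_getElem _ 0 hhm]
        simp [hjeq, List.append_assoc, ← hdrop, List.drop_append_of_le_length hh]
      rw [hB, hrepr]
      exact ih (window.eraseIdx i ++ [(moved ++ [window[i]]).getD h 0])
        (moved ++ [window[i]]) j (h + 1)
        (fun t' ht' => hgood t' (by simp [ht']))
        (by simp [hwlen]; omega) (by omega) (by simp; omega) (by simp; omega)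

theorem TRNAP_spec : Claim_equal_TRNAP := by
  intro in_ls intk_ls _ hpre
  unfold Spec_TRNAP TRNAP TRNAP_alt
  obtain ⟨hne, hk⟩ := hpre
  rcases eq_or_ne intk_ls [] with rfl | hks
  · simp
  · have hn : 1 ≤ in_ls.length := by
      have := hne hks
      cases in_ls with
      | nil => simp at this
      | cons a l => simp
    have hw : (if in_ls.length > 15 then 15 else in_ls.length) = min 15 in_ls.length := by
      split <;> omega
    have hgood : ∀ t ∈ intk_ls.map (fun k => k.emod 16) ++
        intk_ls.map (fun k => (k.fdiv 16).emod 16), pvGood in_ls.length t := by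
      intro t ht
      rcases List.mem_append.1 ht with hm | hm <;>
        obtain ⟨k, hk', rfl⟩ := List.mem_map.1 hm
      · exact ⟨Int.emod_nonneg k (by norm_num), Int.emod_lt_of_pos k (by norm_num),
          (hk k hk').1⟩
      · exact ⟨Int.emod_nonneg _ (by norm_num), Int.emod_lt_of_pos _ (by norm_num),
          (hk k hk').2⟩
    have := pvLoop_eq in_ls hn
      (intk_ls.map (fun k => k.emod 16) ++ intk_ls.map (fun k => (k.fdiv 16).emod 16))
      (in_ls.take (min 15 in_ls.length)) [] (min 15 in_ls.length) 0 hgood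
      (by simp) (by omega) (by simp) (by simp)
    simp only [List.drop_nil, List.append_nil, List.take_append_drop] at this
    simp only [hw]
    exact this
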